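-- pv_equiv track=rewrite | github.com/Zship135/rpgnlp | rpgnlp/engine.py | _tokenize_directions
-- ===== SOURCE A (Python) =====
-- def _tokenize_directions(tags: list[tuple]) -> list[tuple]:
--     '''tag any direction word with "DIR"'''
--     new_tags = []
--     direction_words = ["north", "east", "south", "west"]
--     for i, tag in enumerate(tags):
--         if tag[0] in direction_words:
--             new_tag = (tag[0], "DIR")
--             new_tags.append(new_tag)
--         else:
--             new_tags.append(tag)
--
--     '''find compound directions'''
--     tags = new_tags
--     new_tags = []
--     c = 0
--     direction = ""
--     while c < len(tags):
--         if tags[c][1] == "DIR":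
--             if direction == "":
--                 direction = tags[c][0]
--             else:
--                 direction = direction + " " + tags[c][0]
--         elif direction == "":
--             new_tags.append(tags[c])
--         else:
--             new_tags.append((direction, "DIR"))
--             new_tags.append(tags[c])
--             direction = ""
--         c += 1
--     if direction != "":
--         new_tags.append((direction, "DIR"))
--
--     '''see if any directions are part of a noun'''
--     tags = new_tags
--     new_tags = []
--     c = 0
--     while c < len(tags):
--         if c+1 < len(tags):
--             if tags[c+1][1] == "NN" and tags[c][1] == "DIR":
--                 new_tags.append((tags[c][0] + " " + tags[c+1][0], "NN"))
--                 c += 1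
--             else:
--                 new_tags.append(tags[c])
--         else:
--             new_tags.append(tags[c])
--             break
--         c += 1
--
--     return new_tags
-- ===== SOURCE B (Python) =====
-- def _tokenize_directions(tags: list[tuple]) -> list[tuple]:
--     """Single pass: accumulate a pending compound direction, merging it into a
--     following noun or flushing it as a DIR tag."""
--     direction_words = ["north", "east", "south", "west"]
--     out = []
--     acc = ""
--     for tag in tags:
--         if tag[0] in direction_words or tag[1] == "DIR":
--             acc = tag[0] if acc == "" else acc + " " + tag[0]
--         elif tag[1] == "NN" and acc != "":
--             out.append((acc + " " + tag[0], "NN"))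
--             acc = ""
--         elif acc == "":
--             out.append(tag)
--         else:
--             out.append((acc, "DIR"))
--             out.append(tag)
--             acc = ""
--     if acc != "":
--         out.append((acc, "DIR"))
--     return out
-- ===== Notes on version B (the rewrite author's own statement) =====
-- stated objective: simpler
-- what changed: A's three list passes (retag direction words, merge adjacent DIR runs, glue a DIR onto a following noun) are fused into a single loop carrying a pending-compound string accumulator.
import Mathlib
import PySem

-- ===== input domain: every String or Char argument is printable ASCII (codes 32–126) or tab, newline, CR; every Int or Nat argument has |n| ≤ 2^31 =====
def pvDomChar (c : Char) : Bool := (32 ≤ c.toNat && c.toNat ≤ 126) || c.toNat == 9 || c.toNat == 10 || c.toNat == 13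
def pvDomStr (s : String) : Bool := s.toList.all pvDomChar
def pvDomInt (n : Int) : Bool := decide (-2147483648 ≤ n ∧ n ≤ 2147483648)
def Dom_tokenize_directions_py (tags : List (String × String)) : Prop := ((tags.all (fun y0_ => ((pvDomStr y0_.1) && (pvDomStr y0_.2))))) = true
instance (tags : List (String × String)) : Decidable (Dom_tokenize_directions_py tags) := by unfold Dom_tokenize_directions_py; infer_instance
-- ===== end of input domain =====

-- B fuses A's three passes (tag directions, merge runs, glue onto a noun) into one
-- loop with a pending-compound accumulator; objective: simpler (same O(n) cost).

-- ===== PORT A =====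
def pvDirWords : List String := ["north", "east", "south", "west"]

-- pass 1: tag any direction word with "DIR"
def pvPass1 : List (String × String) → List (String × String)
  | [] => []
  | t :: ts => (if t.1 ∈ pvDirWords then (t.1, "DIR") else t) :: pvPass1 ts

-- pass 2: the while loop over tags with state `direction`, plus the trailing flush
def pvPass2 : List (String × String) → String → List (String × String)
  | [], d => if d = "" then [] else [(d, "DIR")]
  | t :: ts, d =>
    if t.2 = "DIR" then
      pvPass2 ts (if d = "" then t.1 else d ++ " " ++ t.1)
    else if d = "" then
      t :: pvPass2 ts ""
    else
      (d, "DIR") :: t :: pvPass2 ts ""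

-- pass 3: the lookahead while loop merging a DIR followed by an NN
def pvPass3 : List (String × String) → List (String × String)
  | [] => []
  | [t] => [t]
  | a :: b :: ts =>
    if b.2 = "NN" ∧ a.2 = "DIR" then
      (a.1 ++ " " ++ b.1, "NN") :: pvPass3 ts
    else
      a :: pvPass3 (b :: ts)

def tokenize_directions_py (tags : List (String × String)) : List (String × String) :=
  pvPass3 (pvPass2 (pvPass1 tags) "")

-- ===== PORT B =====
def pvFuse : List (String × String) → String → List (String × String)
  | [], acc => if acc = "" then [] else [(acc, "DIR")]
  | t :: ts, acc =>
    if t.1 ∈ pvDirWords ∨ t.2 = "DIR" then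
      pvFuse ts (if acc = "" then t.1 else acc ++ " " ++ t.1)
    else if t.2 = "NN" ∧ acc ≠ "" then
      (acc ++ " " ++ t.1, "NN") :: pvFuse ts ""
    else if acc = "" then
      t :: pvFuse ts ""
    else
      (acc, "DIR") :: t :: pvFuse ts ""

def tokenize_directions_py_alt (tags : List (String × String)) : List (String × String) :=
  pvFuse tags ""

-- ===== PRECONDITION & SPEC =====
def Spec_tokenize_directions_py (tags : List (String × String)) (out : List (String × String)) : Prop := out = tokenize_directions_py_alt tags
instance (tags : List (String × String)) (out : List (String × String)) : Decidable (Spec_tokenize_directions_py tags out) := by unfold Spec_tokenize_directions_py; infer_instance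

-- ===== CLAIM (what is proved, stated in full; the proofs are below) =====
def Claim_equal_tokenize_directions_py : Prop := ∀ (tags : List (String × String)), Dom_tokenize_directions_py tags → Spec_tokenize_directions_py tags (tokenize_directions_py tags)

-- ===== LEMMAS AND PROOFS =====

-- pass 3 lets a non-DIR head through unchanged
lemma pvPass3_cons_notdir (t : String × String) (ts : List (String × String))
    (h : t.2 ≠ "DIR") : pvPass3 (t :: ts) = t :: pvPass3 ts := by
  cases ts with
  | nil => rfl
  | cons b rest =>
    simp only [pvPass3]
    rw [if_neg]
    rintro ⟨_, h2⟩
    exact h h2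

lemma pvFuse_eq_passes (ts : List (String × String)) :
    ∀ d, pvPass3 (pvPass2 (pvPass1 ts) d) = pvFuse ts d := by
  induction ts with
  | nil =>
    intro d
    simp only [pvPass1, pvPass2, pvFuse]
    split_ifs <;> rfl
  | cons t ts ih =>
    intro d
    simp only [pvPass1, pvPass2, pvFuse]
    by_cases hdir : t.1 ∈ pvDirWords ∨ t.2 = "DIR"
    · have h2 : (if t.1 ∈ pvDirWords then ((t.1, "DIR") : String × String) else t).2 = "DIR" := by
        rcases hdir with h | h
        · simp [h]
        · by_cases hm : t.1 ∈ pvDirWords <;> simp [hm, h]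
      have h1 : (if t.1 ∈ pvDirWords then ((t.1, "DIR") : String × String) else t).1 = t.1 := by
        by_cases hm : t.1 ∈ pvDirWords <;> simp [hm]
      rw [if_pos hdir, if_pos h2, h1, ih]
    · push_neg at hdir
      obtain ⟨hm, hD⟩ := hdir
      rw [if_neg hm, if_neg (by simp [hm, hD] : ¬ (t.1 ∈ pvDirWords ∨ t.2 = "DIR")), if_neg hD]
      by_cases hd : d = ""
      · rw [if_pos hd, if_neg (by simp [hd] : ¬ (t.2 = "NN" ∧ d ≠ "")), if_pos hd,
           pvPass3_cons_notdir t _ hD, ih]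
      · rw [if_neg hd]
        by_cases hNN : t.2 = "NN"
        · rw [if_pos ⟨hNN, hd⟩]
          simp only [pvPass3]
          rw [if_pos ⟨hNN, trivial⟩, ih]
        · rw [if_neg (by simp [hNN] : ¬ (t.2 = "NN" ∧ d ≠ "")), if_neg hd]
          simp only [pvPass3]
          rw [if_neg (fun h => hNN h.1), pvPass3_cons_notdir t _ hD, ih]

-- ===== VERDICT (by name: the statement is the Claim_ definition above) =====
theorem tokenize_directions_py_spec : Claim_equal_tokenize_directions_py := by
  intro tags _
  unfold Spec_tokenize_directions_py tokenize_directions_py tokenize_directions_py_alt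
  exact pvFuse_eq_passes tags ""
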